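-- pv_equiv track=rewrite | github.com/abl030/cratedigger | lib/browse.py | rank_candidate_dirs
-- ===== SOURCE A (Python) =====
-- _PENALTY_KEYWORDS = (
--     "archive", "best of", "greatest hits", "magazine", "compilation",
--     "singles", "soundtrack", "various", "bootleg", "discography",
-- )
--
-- def rank_candidate_dirs(
--     file_dirs: list[str], album_title: str, artist_name: str
-- ) -> list[str]:
--     """Sort candidate directories by likelihood of being the correct album."""
--     title_lower = album_title.lower()
--     artist_lower = artist_name.lower()
--
--     def _score(d: str) -> int:
--         d_lower = d.lower()
--         score = 0
--         if title_lower in d_lower: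
--             score += 2
--         if artist_lower in d_lower:
--             score += 1
--         for kw in _PENALTY_KEYWORDS:
--             if kw in d_lower:
--                 score -= 3
--                 break
--         return score
--
--     return sorted(file_dirs, key=_score, reverse=True)
-- ===== SOURCE B (Python) =====
-- _PENALTY_KEYWORDS = (
--     "archive", "best of", "greatest hits", "magazine", "compilation",
--     "singles", "soundtrack", "various", "bootleg", "discography",
-- )
--
-- def rank_candidate_dirs(file_dirs, album_title, artist_name):
--     """Single-pass bucket sort: drop each directory into one of seven score
--     buckets (scores 3..-3) in input order, then concatenate buckets high-to-low.
--     Stable like sorted(reverse=True) because appends keep input order."""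
--     t = album_title.lower()
--     a = artist_name.lower()
--     b3, b2, b1, b0, bn1, bn2, bn3 = [], [], [], [], [], [], []
--     for d in file_dirs:
--         dl = d.lower()
--         s = ((2 if t in dl else 0)
--              + (1 if a in dl else 0)
--              - (3 if any(kw in dl for kw in _PENALTY_KEYWORDS) else 0))
--         if s == 3:
--             b3.append(d)
--         elif s == 2:
--             b2.append(d)
--         elif s == 1:
--             b1.append(d)
--         elif s == 0:
--             b0.append(d)
--         elif s == -1:
--             bn1.append(d)
--         elif s == -2:
--             bn2.append(d)
--         else:
--             bn3.append(d)
--     return b3 + b2 + b1 + b0 + bn1 + bn2 + bn3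
-- ===== Notes on version B (the rewrite author's own statement) =====
-- stated objective: alternative
-- what changed: Replaces the comparison sort (sorted with key, reverse=True) by a single-pass bucket sort: each directory's score (computed as one arithmetic expression over the three conditions) selects one of seven score buckets 3..-3, appended in input order, and the buckets are concatenated high-to-low, which reproduces the stable reverse sort exactly.
import Mathlib
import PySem

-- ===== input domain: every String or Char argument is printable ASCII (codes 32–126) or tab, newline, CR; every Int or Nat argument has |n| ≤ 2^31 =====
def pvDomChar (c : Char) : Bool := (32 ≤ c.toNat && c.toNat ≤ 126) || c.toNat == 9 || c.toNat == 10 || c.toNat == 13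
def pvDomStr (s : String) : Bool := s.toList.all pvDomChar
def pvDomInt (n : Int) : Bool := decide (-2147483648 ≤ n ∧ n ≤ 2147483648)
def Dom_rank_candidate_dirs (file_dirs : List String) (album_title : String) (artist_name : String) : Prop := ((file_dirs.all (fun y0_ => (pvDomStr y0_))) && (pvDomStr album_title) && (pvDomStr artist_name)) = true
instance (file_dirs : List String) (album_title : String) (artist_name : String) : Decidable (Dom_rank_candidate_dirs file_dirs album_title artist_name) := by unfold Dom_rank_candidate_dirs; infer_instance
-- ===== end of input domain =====

-- B replaces the stable reverse comparison sort by a single-pass bucket sort into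
-- seven score buckets (3..-3) concatenated high-to-low; same return value,
-- stated as exact equivalence below.

-- ===== PORT A =====
-- _PENALTY_KEYWORDS (module constant, shared by both Pythons)
def pvPenaltyKeywords : List String :=
  ["archive", "best of", "greatest hits", "magazine", "compilation",
   "singles", "soundtrack", "various", "bootleg", "discography"]

-- the nested _score of A
def pvScore (title_lower artist_lower : String) (d : String) : Int :=
  let d_lower := PySem.Str.lower d
  let score : Int := 0
  let score := if PySem.Str.isIn title_lower d_lower then score + 2 else score
  let score := if PySem.Str.isIn artist_lower d_lower then score + 1 else score
  -- the for/break loop subtracts 3 once, iff some keyword occurs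
  if pvPenaltyKeywords.any (fun kw => PySem.Str.isIn kw d_lower) then score - 3 else score

def rank_candidate_dirs (file_dirs : List String) (album_title : String) (artist_name : String) : List String :=
  let title_lower := PySem.Str.lower album_title
  let artist_lower := PySem.Str.lower artist_name
  PySem.List.sorted file_dirs (pvScore title_lower artist_lower) true

-- ===== PORT B =====
-- B's score: one arithmetic expression over the three conditions
def pvScoreB (t a : String) (d : String) : Int :=
  let dl := PySem.Str.lower d
  (if PySem.Str.isIn t dl then (2 : Int) else 0)
    + (if PySem.Str.isIn a dl then (1 : Int) else 0)
    - (if pvPenaltyKeywords.any (fun kw => PySem.Str.isIn kw dl) then (3 : Int) else 0)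

-- B's loop: drop each directory into its score bucket, then concatenate 3..-3
def pvBucketize (t a : String) :
    List String → List String → List String → List String → List String →
    List String → List String → List String → List String
  | [], b3, b2, b1, b0, bn1, bn2, bn3 => b3 ++ b2 ++ b1 ++ b0 ++ bn1 ++ bn2 ++ bn3
  | d :: ds, b3, b2, b1, b0, bn1, bn2, bn3 =>
    let s := pvScoreB t a d
    if s = 3 then pvBucketize t a ds (b3 ++ [d]) b2 b1 b0 bn1 bn2 bn3
    else if s = 2 then pvBucketize t a ds b3 (b2 ++ [d]) b1 b0 bn1 bn2 bn3
    else if s = 1 then pvBucketize t a ds b3 b2 (b1 ++ [d]) b0 bn1 bn2 bn3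
    else if s = 0 then pvBucketize t a ds b3 b2 b1 (b0 ++ [d]) bn1 bn2 bn3
    else if s = -1 then pvBucketize t a ds b3 b2 b1 b0 (bn1 ++ [d]) bn2 bn3
    else if s = -2 then pvBucketize t a ds b3 b2 b1 b0 bn1 (bn2 ++ [d]) bn3
    else pvBucketize t a ds b3 b2 b1 b0 bn1 bn2 (bn3 ++ [d])

def rank_candidate_dirs_alt (file_dirs : List String) (album_title : String) (artist_name : String) : List String :=
  pvBucketize (PySem.Str.lower album_title) (PySem.Str.lower artist_name)
    file_dirs [] [] [] [] [] [] []

-- ===== PRECONDITION & SPEC =====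
def Spec_rank_candidate_dirs (file_dirs : List String) (album_title : String) (artist_name : String) (out : List String) : Prop := out = rank_candidate_dirs_alt file_dirs album_title artist_name
instance (file_dirs : List String) (album_title : String) (artist_name : String) (out : List String) : Decidable (Spec_rank_candidate_dirs file_dirs album_title artist_name out) := by unfold Spec_rank_candidate_dirs; infer_instance

-- ===== CLAIM (what is proved, stated in full; the proofs are below) =====
def Claim_equal_rank_candidate_dirs : Prop := ∀ (file_dirs : List String) (album_title : String) (artist_name : String), Dom_rank_candidate_dirs file_dirs album_title artist_name → Spec_rank_candidate_dirs file_dirs album_title artist_name (rank_candidate_dirs file_dirs album_title artist_name)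

-- ===== LEMMAS AND PROOFS =====

-- the two score computations agree
lemma scoreB_eq_score (t a d : String) : pvScoreB t a d = pvScore t a d := by
  simp only [pvScoreB, pvScore]
  split_ifs <;> ring

-- the score always lies in [3,2,1,0,-1,-2,-3]
lemma score_mem_range (tl al d : String) :
    pvScore tl al d ∈ ([3, 2, 1, 0, -1, -2, -3] : List Int) := by
  dsimp only [pvScore]
  split_ifs <;> simp

-- insertBy skips a prefix none of whose elements x goes before
lemma insertBy_append_of_not_before {α : Type} (before : α → α → Bool) (x : α)
    (p s : List α) (hp : ∀ b ∈ p, before x b = false) :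
    PySem.List.insertBy before x (p ++ s) = p ++ PySem.List.insertBy before x s := by
  induction p with
  | nil => simp
  | cons b p ih =>
    have hb : before x b = false := hp b (by simp)
    simp only [List.cons_append, PySem.List.insertBy, hb]
    simp [ih (fun c hc => hp c (by simp [hc]))]

-- insertBy puts x in front when it goes before everything
lemma insertBy_of_all_before {α : Type} (before : α → α → Bool) (x : α)
    (s : List α) (hs : ∀ b ∈ s, before x b = true) :
    PySem.List.insertBy before x s = x :: s := by
  cases s with
  | nil => simp [PySem.List.insertBy]
  | cons b t => simp [PySem.List.insertBy, hs b (by simp)]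

-- flatMap respects pointwise-on-members equality
lemma flatMap_congr_mem {α β : Type} (l : List α) (f g : α → List β)
    (h : ∀ a ∈ l, f a = g a) : l.flatMap f = l.flatMap g := by
  induction l with
  | nil => rfl
  | cons a t ih =>
    simp only [List.flatMap_cons, h a (by simp), ih (fun b hb => h b (by simp [hb]))]

-- inserting x into score buckets appends it at the end of its own bucket
lemma insertBy_buckets {α : Type} (key : α → Int) (x : α) (xs : List α) :
    ∀ vs : List Int, vs.Pairwise (· > ·) → key x ∈ vs →
      PySem.List.insertBy (fun a b => decide (key b < key a)) x
        (vs.flatMap (fun v => xs.filter (fun y => key y == v)))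
      = vs.flatMap (fun v => (xs ++ [x]).filter (fun y => key y == v)) := by
  intro vs
  induction vs with
  | nil => intro _ h; cases h
  | cons v vs' ih =>
    intro hpw hmem
    have hgt : ∀ v' ∈ vs', v > v' := (List.pairwise_cons.mp hpw).1
    have hpw' : vs'.Pairwise (· > ·) := (List.pairwise_cons.mp hpw).2
    by_cases hkx : key x = v
    · -- x belongs to the head bucket
      have hrest : ∀ b ∈ vs'.flatMap (fun v => xs.filter (fun y => key y == v)),
          (fun a b => decide (key b < key a)) x b = true := by
        intro b hb
        simp only [List.mem_flatMap, List.mem_filter] at hb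
        obtain ⟨v', hv', _, hkb⟩ := hb
        have : key b = v' := by simpa using hkb
        simp [this, hkx, hgt v' hv']
      have hpre : ∀ b ∈ xs.filter (fun y => key y == v),
          (fun a b => decide (key b < key a)) x b = false := by
        intro b hb
        have : key b = v := by simpa using (List.mem_filter.mp hb).2
        simp [this, hkx]
      rw [List.flatMap_cons, insertBy_append_of_not_before _ _ _ _ hpre,
          insertBy_of_all_before _ _ _ hrest, List.flatMap_cons]
      have htail : vs'.flatMap (fun v => (xs ++ [x]).filter (fun y => key y == v))
          = vs'.flatMap (fun v => xs.filter (fun y => key y == v)) := by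
        apply flatMap_congr_mem
        intro v' hv'
        have hne : key x ≠ v' := by have := hgt v' hv'; omega
        simp [List.filter_append, hne]
      rw [htail]
      simp [List.filter_append, hkx]
    · -- x belongs to a later bucket
      have hmem' : key x ∈ vs' := by
        rcases List.mem_cons.mp hmem with h | h
        · exact absurd h hkx
        · exact h
      have hlt : key x < v := hgt _ hmem'
      have hpre : ∀ b ∈ xs.filter (fun y => key y == v),
          (fun a b => decide (key b < key a)) x b = false := by
        intro b hb
        have : key b = v := by simpa using (List.mem_filter.mp hb).2
        simp [this]; omega
      rw [List.flatMap_cons, insertBy_append_of_not_before _ _ _ _ hpre,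
          ih hpw' hmem', List.flatMap_cons]
      simp [List.filter_append, hkx]

-- stable reverse sort by an Int key with values inside a strictly decreasing list vs
-- equals the concatenation of the vs-buckets
lemma sorted_rev_eq_buckets {α : Type} (key : α → Int) (vs : List Int)
    (hpw : vs.Pairwise (· > ·)) (xs : List α) (hall : ∀ x ∈ xs, key x ∈ vs) :
    PySem.List.sorted xs key true = vs.flatMap (fun v => xs.filter (fun x => key x == v)) := by
  rw [PySem.List.sorted_rev_eq_foldl_insertBy]
  induction xs using List.reverseRecOn with
  | nil => simp
  | append_singleton ys x ih =>
    rw [List.foldl_append, List.foldl_cons, List.foldl_nil,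
        ih (fun y hy => hall y (by simp [hy])),
        insertBy_buckets key x ys vs hpw (hall x (by simp))]

-- filter abbreviation for the invariant
def pvF (t a : String) (v : Int) (xs : List String) : List String :=
  xs.filter (fun d => pvScoreB t a d == v)

-- the bucket pass accumulates exactly the per-score filters
lemma bucketize_invariant (t a : String) (xs : List String) :
    ∀ b3 b2 b1 b0 bn1 bn2 bn3 : List String,
      pvBucketize t a xs b3 b2 b1 b0 bn1 bn2 bn3 =
        (b3 ++ pvF t a 3 xs) ++ (b2 ++ pvF t a 2 xs) ++ (b1 ++ pvF t a 1 xs) ++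
        (b0 ++ pvF t a 0 xs) ++ (bn1 ++ pvF t a (-1) xs) ++
        (bn2 ++ pvF t a (-2) xs) ++ (bn3 ++ pvF t a (-3) xs) := by
  induction xs with
  | nil => intro b3 b2 b1 b0 bn1 bn2 bn3; simp [pvBucketize, pvF]
  | cons d ds ih =>
    intro b3 b2 b1 b0 bn1 bn2 bn3
    have hrange : pvScoreB t a d ∈ ([3, 2, 1, 0, -1, -2, -3] : List Int) := by
      rw [scoreB_eq_score]; exact score_mem_range t a d
    simp only [List.mem_cons, List.not_mem_nil, or_false] at hrange
    simp only [pvBucketize]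
    rcases hrange with h | h | h | h | h | h | h <;>
      · rw [h]
        norm_num
        rw [ih]
        simp [pvF, h, List.append_assoc]

-- ===== VERDICT (by name: the statement is the Claim_ definition above) =====
theorem rank_candidate_dirs_spec : Claim_equal_rank_candidate_dirs := by
  intro file_dirs album_title artist_name _
  unfold Spec_rank_candidate_dirs rank_candidate_dirs rank_candidate_dirs_alt
  rw [bucketize_invariant]
  rw [sorted_rev_eq_buckets _ ([3, 2, 1, 0, -1, -2, -3]) (by decide) _
      (fun x _ => score_mem_range _ _ x)]
  have hf : ∀ v, pvF (PySem.Str.lower album_title) (PySem.Str.lower artist_name) v file_dirs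
      = file_dirs.filter (fun x =>
          pvScore (PySem.Str.lower album_title) (PySem.Str.lower artist_name) x == v) := by
    intro v
    unfold pvF
    exact List.filter_congr (fun x _ => by rw [scoreB_eq_score])
  simp [hf, List.append_assoc]
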